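-- pv_equiv track=rewrite | github.com/dk-miptedu/fintechdevadv | src/main_menu/MenuStructure.py | get_terminal_points
-- ===== SOURCE A (Python) =====
-- def get_terminal_points(menu_structure, current_level):
--     terminal_points = []
--
--     # Получаем элементы текущего уровня
--     for item in menu_structure.get(current_level, []):
--         # Если элемент есть в ключах menu_structure, это подменю, нужно рекурсивно проверить его
--         if item in menu_structure:
--             terminal_points.extend(get_terminal_points(menu_structure, item))
--         else:
--             # Если элемента нет в ключах menu_structure, это конечный пункт
--             terminal_points.append(item)
--     return terminal_points
-- ===== SOURCE B (Python) =====
-- def get_terminal_points(menu_structure, current_level):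
--     terminal_points = []
--     stack = list(reversed(menu_structure.get(current_level, [])))
--     while stack:
--         item = stack.pop()
--         children = menu_structure.get(item)
--         if children is None:
--             terminal_points.append(item)
--         else:
--             stack.extend(reversed(children))
--     return terminal_points
-- ===== Notes on version B (the rewrite author's own statement) =====
-- stated objective: alternative
-- what changed: A's recursive descent (one Python call per submenu, results merged by extend at every level) is replaced by a single iterative worklist loop with an explicit stack: pop an item, push its children reversed if it is a submenu key, else append it to the result.
import Mathlib
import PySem

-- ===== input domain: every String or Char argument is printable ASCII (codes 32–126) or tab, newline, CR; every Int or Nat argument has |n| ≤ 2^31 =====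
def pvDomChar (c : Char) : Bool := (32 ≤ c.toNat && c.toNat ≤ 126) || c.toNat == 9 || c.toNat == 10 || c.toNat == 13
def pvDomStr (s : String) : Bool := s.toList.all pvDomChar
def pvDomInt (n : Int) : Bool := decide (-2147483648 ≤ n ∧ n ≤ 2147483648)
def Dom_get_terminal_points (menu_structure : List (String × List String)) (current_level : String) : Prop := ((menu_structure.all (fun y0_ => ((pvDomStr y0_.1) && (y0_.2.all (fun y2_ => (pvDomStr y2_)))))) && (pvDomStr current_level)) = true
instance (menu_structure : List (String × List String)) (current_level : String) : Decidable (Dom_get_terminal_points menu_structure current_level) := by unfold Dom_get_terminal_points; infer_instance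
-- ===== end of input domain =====

-- B replaces A's recursive descent by a single iterative loop over an explicit stack;
-- equivalence is proved on Pre_ (no cycle reachable from current_level, i.e. exactly the
-- inputs on which Python A returns instead of raising RecursionError).

-- ===== PORT A =====
-- Python A recurses without a bound; the port carries fuel `ms.length + 1`, which on every input of
-- Pre_ is enough (with no reachable cycle the recursion depth is bounded by the number of keys);
-- outside Pre_ (where Python A raises RecursionError) nothing is claimed.
def pvRecA : Nat → List (String × List String) → String → List String
  | 0, _, _ => []
  | n+1, ms, cl =>
      ((PySem.Dict.mk ms).getD cl []).foldl
        (fun acc item =>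
          if (PySem.Dict.mk ms).contains item then acc ++ pvRecA n ms item
          else acc ++ [item]) []

def get_terminal_points (menu_structure : List (String × List String)) (current_level : String) : List String :=
  pvRecA (menu_structure.length + 1) menu_structure current_level

-- ===== PORT B =====
-- The Lean stack list is the Python stack list REVERSED (head = top = the element Python pops from
-- the end), so `list(reversed(children))` pushed at the Python end appears as `children ++ rest`.
-- The while-loop carries fuel; `pvFuelB` dominates the iteration count on every input of Pre_.
def pvLoopB : Nat → List (String × List String) → List String → List String → Option (List String)
  | 0, _, _, _ => none
  | _+1, _, [], acc => some acc
  | n+1, ms, item :: rest, acc =>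
      match (PySem.Dict.mk ms).get? item with
      | none => pvLoopB n ms rest (acc ++ [item])
      | some children => pvLoopB n ms (children ++ rest) acc

def pvFuelB (ms : List (String × List String)) : Nat :=
  (2 + (ms.map (fun p => p.2.length)).sum) ^ (ms.length + 1)

def get_terminal_points_alt (menu_structure : List (String × List String)) (current_level : String) : List String :=
  (pvLoopB (pvFuelB menu_structure) menu_structure
      ((PySem.Dict.mk menu_structure).getD current_level []) []).getD []

-- ===== PRECONDITION & SPEC =====

-- children list of key x (first match), [] if absent
def pvChl : List (String × List String) → String → List String
  | [], _ => []
  | p :: t, x => if p.1 = x then p.2 else pvChl t x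

-- position of key x counted from the END of the list (suffix length at its entry); 0 if absent
def pvPos : List (String × List String) → String → Nat
  | [], _ => 0
  | p :: t, x => if p.1 = x then t.length + 1 else pvPos t x

def pvKeysF (ms : List (String × List String)) : Finset String := (ms.map Prod.fst).toFinset

-- one step of the reachability closure: add every key referenced from a member's children
def pvStep (ms : List (String × List String)) (S : Finset String) : Finset String :=
  S ∪ (pvKeysF ms).filter (fun c => ∃ k ∈ S, c ∈ pvChl ms k)

-- the keys reachable from current_level (ms.length iterations reach the fixpoint)
def pvReach (ms : List (String × List String)) (cl : String) : Finset String :=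
  (pvStep ms)^[ms.length] (if 0 < pvPos ms cl then {cl} else ∅)

-- Pre_ excludes exactly the inputs on which a submenu-reference cycle is reachable from
-- current_level: there Python A raises RecursionError (and B's while-loop does not terminate).
-- Closed form: every nonempty set of reachable keys contains a key referencing none of the set.
def Pre_get_terminal_points (menu_structure : List (String × List String)) (current_level : String) : Prop :=
  ∀ S ∈ (pvReach menu_structure current_level).powerset, S.Nonempty →
    ∃ k ∈ S, ∀ c ∈ pvChl menu_structure k, c ∉ S
instance (menu_structure : List (String × List String)) (current_level : String) : Decidable (Pre_get_terminal_points menu_structure current_level) := by unfold Pre_get_terminal_points; infer_instance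

def pvWitness_get_terminal_points : (List (String × List String)) × String :=
  ([("main", ["a", "sub"]), ("sub", ["b", "c"])], "main")

def Spec_get_terminal_points (menu_structure : List (String × List String)) (current_level : String) (out : List String) : Prop := out = get_terminal_points_alt menu_structure current_level
instance (menu_structure : List (String × List String)) (current_level : String) (out : List String) : Decidable (Spec_get_terminal_points menu_structure current_level out) := by unfold Spec_get_terminal_points; infer_instance

-- ===== CLAIM (what is proved, stated in full; the proofs are below) =====
def Claim_equal_get_terminal_points : Prop := ∀ (menu_structure : List (String × List String)) (current_level : String), Dom_get_terminal_points menu_structure current_level → Pre_get_terminal_points menu_structure current_level → Spec_get_terminal_points menu_structure current_level (get_terminal_points menu_structure current_level)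

-- ===== LEMMAS AND PROOFS =====

-- the submenu-reference graph: an edge from key a to key b referenced among a's children
def pvEdge (ms : List (String × List String)) (a b : String) : Prop :=
  0 < pvPos ms a ∧ 0 < pvPos ms b ∧ b ∈ pvChl ms a

-- reachable-from-current_level predicate (the relational counterpart of pvReach)
def pvReachP (ms : List (String × List String)) (cl x : String) : Prop :=
  x = cl ∨ Relation.TransGen (pvEdge ms) cl x

-- keys reachable from x (x itself included)
def pvRS (ms : List (String × List String)) (x : String) : Set String :=
  {j | j = x ∨ Relation.TransGen (pvEdge ms) x j}

-- the termination measure: number of reachable keys for a key, 0 for a leaf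
noncomputable def pvM (ms : List (String × List String)) (x : String) : Nat :=
  if 0 < pvPos ms x then (pvRS ms x).ncard else 0

-- the expansion of one stack item: A's full result for a key, the item itself for a leaf
def pvE (ms : List (String × List String)) (x : String) : List String :=
  if 0 < pvPos ms x then pvRecA (ms.length + 1) ms x else [x]

def pvT (ms : List (String × List String)) : Nat := 2 + (ms.map (fun p => p.2.length)).sum

noncomputable def pvPhi (ms : List (String × List String)) (stack : List String) : Nat :=
  (stack.map (fun x => if 0 < pvPos ms x then pvT ms ^ pvM ms x else 1)).sum

theorem pvChl_of_pos_zero (ms : List (String × List String)) (x : String)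
    (h : pvPos ms x = 0) : pvChl ms x = [] := by
  induction ms with
  | nil => simp [pvChl]
  | cons p t ih =>
    simp only [pvPos, pvChl] at *
    split at h
    · omega
    · simp_all

theorem pvPos_pos_iff (ms : List (String × List String)) (x : String) :
    0 < pvPos ms x ↔ x ∈ ms.map Prod.fst := by
  induction ms with
  | nil => simp [pvPos]
  | cons p t ih =>
    simp only [pvPos, List.map_cons, List.mem_cons]
    by_cases h : p.1 = x
    · simp [h]
    · simp only [h, if_false, ih]
      constructor
      · intro hm; exact Or.inr hm
      · rintro (he | hm)
        · exact absurd he.symm h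
        · exact hm

theorem pvGet?_mk (ms : List (String × List String)) (x : String) :
    (PySem.Dict.mk ms).get? x = if 0 < pvPos ms x then some (pvChl ms x) else none := by
  induction ms with
  | nil => simp [PySem.Dict.get?, pvPos]
  | cons p t ih =>
    rw [PySem.Dict.get?_mk_cons, ih]
    simp only [pvPos, pvChl, beq_iff_eq]
    by_cases h : p.1 = x <;> simp [h]

theorem pvGetD_mk (ms : List (String × List String)) (x : String) :
    (PySem.Dict.mk ms).getD x [] = pvChl ms x := by
  rw [PySem.Dict.getD_eq_get?_getD, pvGet?_mk]
  split
  · rfl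
  · exact (pvChl_of_pos_zero ms x (by omega)).symm

theorem pvContains_mk (ms : List (String × List String)) (x : String) :
    (PySem.Dict.mk ms).contains x = decide (0 < pvPos ms x) := by
  rw [PySem.Dict.contains_eq_isSome_get?, pvGet?_mk]
  split <;> simp_all

theorem pvTransGen_key (ms : List (String × List String)) (a b : String)
    (h : Relation.TransGen (pvEdge ms) a b) : 0 < pvPos ms b := by
  induction h with
  | single h => exact h.2.1
  | tail _ h _ => exact h.2.1

-- ---- the reachability fixpoint ----

theorem pvStep_supset (ms : List (String × List String)) (S : Finset String) :
    S ⊆ pvStep ms S := Finset.subset_union_left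

theorem pvStep_keys (ms : List (String × List String)) (S : Finset String)
    (h : S ⊆ pvKeysF ms) : pvStep ms S ⊆ pvKeysF ms := by
  intro c hc
  rcases Finset.mem_union.mp hc with h1 | h1
  · exact h h1
  · exact (Finset.mem_filter.mp h1).1

theorem pvIter_supset (ms : List (String × List String)) (S : Finset String) (n : Nat) :
    S ⊆ (pvStep ms)^[n] S := by
  induction n generalizing S with
  | zero => simp
  | succ n ih =>
    rw [Function.iterate_succ_apply]
    exact (pvStep_supset ms S).trans (ih (pvStep ms S))

theorem pvIter_fixed (ms : List (String × List String)) :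
    ∀ n S, S ⊆ pvKeysF ms → (pvKeysF ms).card ≤ S.card + n →
      pvStep ms ((pvStep ms)^[n] S) = (pvStep ms)^[n] S := by
  intro n
  induction n with
  | zero =>
    intro S hsub hcard
    simp only [Function.iterate_zero, id_eq]
    have hSK : S = pvKeysF ms := Finset.eq_of_subset_of_card_le hsub (by omega)
    rw [hSK]
    exact Finset.Subset.antisymm (pvStep_keys ms _ subset_rfl) (pvStep_supset ms _)
  | succ n ih =>
    intro S hsub hcard
    by_cases hfix : pvStep ms S = S
    · rw [Function.iterate_fixed hfix, hfix]
    · rw [Function.iterate_succ_apply]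
      apply ih (pvStep ms S) (pvStep_keys ms S hsub)
      have hss : S ⊂ pvStep ms S := Finset.ssubset_iff_subset_ne.mpr ⟨pvStep_supset ms S, fun h => hfix h.symm⟩
      have := Finset.card_lt_card hss
      omega

theorem pvKeysF_card_le (ms : List (String × List String)) :
    (pvKeysF ms).card ≤ ms.length := by
  calc (pvKeysF ms).card ≤ (ms.map Prod.fst).length := List.toFinset_card_le _
    _ = ms.length := List.length_map _

theorem pvReach_fixed (ms : List (String × List String)) (cl : String) :
    pvStep ms (pvReach ms cl) = pvReach ms cl := by
  unfold pvReach
  apply pvIter_fixed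
  · split
    · intro j hj
      rw [Finset.mem_singleton] at hj
      subst hj
      exact List.mem_toFinset.mpr ((pvPos_pos_iff ms j).mp ‹0 < pvPos ms j›)
    · exact Finset.empty_subset _
  · have := pvKeysF_card_le ms
    split <;> simp <;> omega

theorem pvReach_base (ms : List (String × List String)) (cl : String)
    (h : 0 < pvPos ms cl) : cl ∈ pvReach ms cl := by
  unfold pvReach
  rw [if_pos h]
  exact pvIter_supset ms {cl} ms.length (Finset.mem_singleton_self cl)

theorem pvReach_closed (ms : List (String × List String)) (cl k c : String)
    (hk : k ∈ pvReach ms cl) (hc : c ∈ pvChl ms k) (hck : 0 < pvPos ms c) :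
    c ∈ pvReach ms cl := by
  rw [← pvReach_fixed ms cl]
  apply Finset.mem_union_right
  rw [Finset.mem_filter]
  exact ⟨List.mem_toFinset.mpr ((pvPos_pos_iff ms c).mp hck), k, hk, hc⟩

theorem pvReachP_mem (ms : List (String × List String)) (cl k : String)
    (hr : pvReachP ms cl k) (hk : 0 < pvPos ms k) : k ∈ pvReach ms cl := by
  rcases hr with rfl | ht
  · exact pvReach_base ms k hk
  · clear hk
    induction ht with
    | single h => exact pvReach_closed ms cl cl _ (pvReach_base ms cl h.1) h.2.2 h.2.1
    | tail _ h ih => exact pvReach_closed ms cl _ _ ih h.2.2 h.2.1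

-- Pre_ forbids exactly the cycles through keys reachable from current_level
theorem pvAcyclic (ms : List (String × List String)) (cl : String)
    (hpre : Pre_get_terminal_points ms cl) :
    ∀ k, pvReachP ms cl k → ¬ Relation.TransGen (pvEdge ms) k k := by
  classical
  intro k hrk hk
  -- the keys on cycles through k
  set S0 : Set String :=
    {j | Relation.TransGen (pvEdge ms) k j ∧ Relation.TransGen (pvEdge ms) j k} with hS0
  have hreach : ∀ j ∈ S0, j ∈ pvReach ms cl := by
    intro j hj
    have hjkey := pvTransGen_key ms k j hj.1
    have hrj : pvReachP ms cl j := by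
      rcases hrk with rfl | ht
      · exact Or.inr hj.1
      · exact Or.inr (ht.trans hj.1)
    exact pvReachP_mem ms cl j hrj hjkey
  set F : Finset String := (pvReach ms cl).filter (fun j => j ∈ S0) with hF
  have hFS0 : ∀ j, j ∈ F ↔ j ∈ S0 := by
    intro j
    rw [hF, Finset.mem_filter]
    exact ⟨fun h => h.2, fun h => ⟨hreach j h, h⟩⟩
  have hkS0 : k ∈ S0 := ⟨hk, hk⟩
  obtain ⟨k', hk'F, hleaf⟩ :=
    hpre F (Finset.mem_powerset.mpr (Finset.filter_subset _ _)) ⟨k, (hFS0 k).mpr hkS0⟩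
  have hk'S0 : k' ∈ S0 := (hFS0 k').mp hk'F
  -- k' has an outgoing cycle edge, landing on a child in S0
  obtain ⟨c, hedge, hcrest⟩ := (Relation.TransGen.head'_iff).mp hk'S0.2
  have hcS0 : c ∈ S0 := by
    refine ⟨hk'S0.1.tail hedge, ?_⟩
    rcases (Relation.reflTransGen_iff_eq_or_transGen.mp hcrest) with he | ht
    · subst he; exact hk
    · exact ht
  exact hleaf c hedge.2.2 ((hFS0 c).mpr hcS0)

theorem pvRS_finite (ms : List (String × List String)) (x : String) : (pvRS ms x).Finite := by
  apply Set.Finite.subset (((ms.map Prod.fst).toFinset : Finset String).finite_toSet.insert x)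
  intro j hj
  rcases hj with rfl | ht
  · exact Set.mem_insert _ _
  · exact Set.mem_insert_of_mem _ (by
      rw [Finset.mem_coe, List.mem_toFinset]
      exact (pvPos_pos_iff ms j).mp (pvTransGen_key ms x j ht))

theorem pvM_le (ms : List (String × List String)) (x : String) : pvM ms x ≤ ms.length := by
  rw [pvM]
  split
  · have hsub : pvRS ms x ⊆ ((ms.map Prod.fst).toFinset : Finset String) := by
      intro j hj
      rw [Finset.mem_coe, List.mem_toFinset]
      rcases hj with rfl | ht
      · exact (pvPos_pos_iff ms j).mp ‹0 < pvPos ms j›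
      · exact (pvPos_pos_iff ms j).mp (pvTransGen_key ms x j ht)
    calc (pvRS ms x).ncard
        ≤ (((ms.map Prod.fst).toFinset : Finset String) : Set String).ncard :=
          Set.ncard_le_ncard hsub (Finset.finite_toSet _)
      _ = (ms.map Prod.fst).toFinset.card := Set.ncard_coe_finset _
      _ ≤ (ms.map Prod.fst).length := List.toFinset_card_le _
      _ = ms.length := List.length_map _
  · omega

theorem pvM_pos (ms : List (String × List String)) (x : String) (hx : 0 < pvPos ms x) :
    0 < pvM ms x := by
  rw [pvM, if_pos hx]
  exact (Set.ncard_pos (pvRS_finite ms x)).mpr ⟨x, Or.inl rfl⟩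

-- a key referenced from a key's children has strictly fewer reachable keys, if x is not on a cycle
theorem pvM_lt (ms : List (String × List String))
    (x c : String) (hacyx : ¬ Relation.TransGen (pvEdge ms) x x)
    (hx : 0 < pvPos ms x) (hc : c ∈ pvChl ms x) (hck : 0 < pvPos ms c) :
    pvM ms c < pvM ms x := by
  have hedge : pvEdge ms x c := ⟨hx, hck, hc⟩
  have hss : pvRS ms c ⊂ pvRS ms x := by
    constructor
    · intro j hj
      rcases hj with rfl | ht
      · exact Or.inr (Relation.TransGen.single hedge)
      · exact Or.inr ((Relation.TransGen.single hedge).trans ht)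
    · intro hsub
      have hxRS : x ∈ pvRS ms c := hsub (Or.inl rfl)
      rcases hxRS with he | ht
      · exact hacyx (by rw [← he] at hedge; exact Relation.TransGen.single hedge)
      · exact hacyx ((Relation.TransGen.single hedge).trans ht)
  simp only [pvM, if_pos hck, if_pos hx]
  exact Set.ncard_lt_ncard hss (pvRS_finite ms x)

-- reachability is preserved along an edge into a key child
theorem pvReachP_child (ms : List (String × List String)) (cl x c : String)
    (hrx : pvReachP ms cl x) (hx : 0 < pvPos ms x) (hc : c ∈ pvChl ms x)
    (hck : 0 < pvPos ms c) : pvReachP ms cl c := by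
  have hedge : pvEdge ms x c := ⟨hx, hck, hc⟩
  rcases hrx with rfl | ht
  · exact Or.inr (Relation.TransGen.single hedge)
  · exact Or.inr (ht.tail hedge)

-- A's fueled recursion: for reachable x and any large-enough fuel, the preorder leaf expansion
theorem pvRecA_eq (ms : List (String × List String)) (cl : String)
    (hacy : ∀ k, pvReachP ms cl k → ¬ Relation.TransGen (pvEdge ms) k k) :
    ∀ r x n, pvReachP ms cl x → pvM ms x ≤ r → pvM ms x < n →
      pvRecA n ms x = (pvChl ms x).flatMap (pvE ms) := by
  intro r
  induction r using Nat.strong_induction_on with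
  | _ r IH =>
    intro x n hrx hr hn
    obtain ⟨m, rfl⟩ : ∃ m, n = m + 1 := ⟨n - 1, by omega⟩
    show pvRecA (m+1) ms x = _
    rw [pvRecA, pvGetD_mk]
    have hcong : ∀ item ∈ pvChl ms x, ∀ acc : List String,
        (if (PySem.Dict.mk ms).contains item then acc ++ pvRecA m ms item
         else acc ++ [item]) = acc ++ pvE ms item := by
      intro item hitem acc
      rw [pvContains_mk]
      by_cases hk : 0 < pvPos ms item
      · have hxpos : 0 < pvPos ms x := by
          by_contra h0
          rw [pvChl_of_pos_zero ms x (by omega)] at hitem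
          simp at hitem
        have hritem : pvReachP ms cl item := pvReachP_child ms cl x item hrx hxpos hitem hk
        have hlt := pvM_lt ms x item (hacy x hrx) hxpos hitem hk
        have hxM := pvM_pos ms x hxpos
        have h1 : pvRecA m ms item = (pvChl ms item).flatMap (pvE ms) :=
          IH (pvM ms item) (by omega) item m hritem le_rfl (by omega)
        have h2 : pvRecA (ms.length + 1) ms item = (pvChl ms item).flatMap (pvE ms) :=
          IH (pvM ms item) (by omega) item (ms.length + 1) hritem le_rfl
            (by have := pvM_le ms item; omega)
        simp [hk, pvE, h1, h2]
      · simp [hk, pvE]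
    rw [PySem.List.foldl_congr_mem' _ _ (fun acc item => acc ++ pvE ms item) _ hcong,
      PySem.List.foldl_append_eq_flatMap]
    simp

theorem pvLoopB_mono (ms : List (String × List String)) :
    ∀ n n' stack acc r, n ≤ n' → pvLoopB n ms stack acc = some r →
      pvLoopB n' ms stack acc = some r := by
  intro n
  induction n with
  | zero => intro n' stack acc r _ h; simp [pvLoopB] at h
  | succ n ih =>
    intro n' stack acc r hle h
    obtain ⟨m, rfl⟩ : ∃ m, n' = m + 1 := ⟨n' - 1, by omega⟩
    cases stack with
    | nil => simpa [pvLoopB] using h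
    | cons x rest =>
      rw [pvLoopB] at h ⊢
      cases hg : (PySem.Dict.mk ms).get? x <;> rw [hg] at h <;>
        exact ih m _ _ r (by omega) h

theorem pvLoopB_cons_none (n : Nat) (ms : List (String × List String)) (x : String)
    (rest acc : List String) (h : (PySem.Dict.mk ms).get? x = none) :
    pvLoopB (n+1) ms (x :: rest) acc = pvLoopB n ms rest (acc ++ [x]) := by
  rw [pvLoopB, h]

theorem pvLoopB_cons_some (n : Nat) (ms : List (String × List String)) (x : String)
    (rest acc ch : List String) (h : (PySem.Dict.mk ms).get? x = some ch) :
    pvLoopB (n+1) ms (x :: rest) acc = pvLoopB n ms (ch ++ rest) acc := by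
  rw [pvLoopB, h]

theorem pvT_ge_two (ms : List (String × List String)) : 2 ≤ pvT ms := by
  simp [pvT]

theorem pvChl_len_le (ms : List (String × List String)) (x : String) :
    (pvChl ms x).length ≤ pvT ms - 2 := by
  have h : (pvChl ms x).length ≤ (ms.map (fun p => p.2.length)).sum := by
    induction ms with
    | nil => simp [pvChl]
    | cons p t ih =>
      simp only [pvChl, List.map_cons, List.sum_cons]
      split
      · omega
      · omega
  simp only [pvT]
  omega

theorem pvPhi_append (ms : List (String × List String)) (s t : List String) :
    pvPhi ms (s ++ t) = pvPhi ms s + pvPhi ms t := by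
  simp [pvPhi]

-- bound on the expansion of one key's children: Φ(children) ≤ T^(M x) − 2
theorem pvPhi_chl_le (ms : List (String × List String))
    (x : String) (hacyx : ¬ Relation.TransGen (pvEdge ms) x x) (hx : 0 < pvPos ms x) :
    pvPhi ms (pvChl ms x) + 2 ≤ pvT ms ^ pvM ms x := by
  have hT := pvT_ge_two ms
  have hxM := pvM_pos ms x hx
  have hbound : ∀ c ∈ pvChl ms x,
      (if 0 < pvPos ms c then pvT ms ^ pvM ms c else 1) ≤ pvT ms ^ (pvM ms x - 1) := by
    intro c hc
    split
    · exact Nat.pow_le_pow_right (by omega)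
        (by have := pvM_lt ms x c hacyx hx hc ‹0 < pvPos ms c›; omega)
    · exact Nat.one_le_pow _ _ (by omega)
  have hsum : pvPhi ms (pvChl ms x) ≤ (pvChl ms x).length * pvT ms ^ (pvM ms x - 1) := by
    unfold pvPhi
    calc (List.map _ (pvChl ms x)).sum
        ≤ (List.map (fun _ => pvT ms ^ (pvM ms x - 1)) (pvChl ms x)).sum := by
          apply List.sum_le_sum
          intro c hc
          exact hbound c hc
      _ = (pvChl ms x).length * pvT ms ^ (pvM ms x - 1) := by
          rw [List.map_const']; simp [List.sum_replicate]
  have hlen := pvChl_len_le ms x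
  have hpow : pvT ms ^ pvM ms x = pvT ms * pvT ms ^ (pvM ms x - 1) := by
    conv_lhs => rw [show pvM ms x = (pvM ms x - 1) + 1 by omega]
    rw [pow_succ, Nat.mul_comm]
  have hone : 1 ≤ pvT ms ^ (pvM ms x - 1) := Nat.one_le_pow _ _ (by omega)
  calc pvPhi ms (pvChl ms x) + 2
      ≤ (pvT ms - 2) * pvT ms ^ (pvM ms x - 1) + 2 := by
        have := Nat.mul_le_mul_right (pvT ms ^ (pvM ms x - 1)) hlen
        omega
    _ ≤ pvT ms ^ pvM ms x := by
        rw [hpow]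
        have hmul : (pvT ms - 2) * pvT ms ^ (pvM ms x - 1) + 2 * pvT ms ^ (pvM ms x - 1)
            = pvT ms * pvT ms ^ (pvM ms x - 1) := by
          rw [← Nat.add_mul, Nat.sub_add_cancel hT]
        omega

-- B's loop: if every key on the stack is reachable from cl, with some fuel below Φ(stack)+1
-- it returns acc ++ the concatenated expansions
theorem pvLoopB_sound (ms : List (String × List String)) (cl : String)
    (hacy : ∀ k, pvReachP ms cl k → ¬ Relation.TransGen (pvEdge ms) k k) :
    ∀ k stack acc, pvPhi ms stack = k →
      (∀ x ∈ stack, 0 < pvPos ms x → pvReachP ms cl x) →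
      ∃ n, n ≤ pvPhi ms stack + 1 ∧
        pvLoopB n ms stack acc = some (acc ++ (stack.map (pvE ms)).flatten) := by
  intro k
  induction k using Nat.strong_induction_on with
  | _ k IH =>
    intro stack acc hk hinv
    cases stack with
    | nil => exact ⟨1, by omega, by simp [pvLoopB]⟩
    | cons x rest =>
      have hinvrest : ∀ y ∈ rest, 0 < pvPos ms y → pvReachP ms cl y := by
        intro y hy; exact hinv y (List.mem_cons_of_mem x hy)
      by_cases hx : 0 < pvPos ms x
      · -- submenu key: expand in place
        have hrx : pvReachP ms cl x := hinv x (List.mem_cons_self ..) hx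
        have hphi := pvPhi_chl_le ms x (hacy x hrx) hx
        have hphicons : pvPhi ms (x :: rest) = pvT ms ^ pvM ms x + pvPhi ms rest := by
          simp [pvPhi, hx]
        have hnew : pvPhi ms (pvChl ms x ++ rest) + 2 ≤ pvPhi ms (x :: rest) := by
          rw [pvPhi_append, hphicons]; omega
        have hinvnew : ∀ y ∈ pvChl ms x ++ rest, 0 < pvPos ms y → pvReachP ms cl y := by
          intro y hy hky
          rcases List.mem_append.mp hy with h1 | h1
          · exact pvReachP_child ms cl x y hrx hx h1 hky
          · exact hinvrest y h1 hky
        obtain ⟨n, hn, hrun⟩ := IH (pvPhi ms (pvChl ms x ++ rest)) (by omega)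
          (pvChl ms x ++ rest) acc rfl hinvnew
        refine ⟨n + 1, by omega, ?_⟩
        rw [pvLoopB_cons_some n ms x rest acc (pvChl ms x) (by rw [pvGet?_mk, if_pos hx]), hrun]
        have hEx : pvE ms x = ((pvChl ms x).map (pvE ms)).flatten := by
          rw [pvE, if_pos hx,
            pvRecA_eq ms cl hacy (pvM ms x) x (ms.length + 1) hrx le_rfl
              (by have := pvM_le ms x; omega), List.flatMap_def]
        simp [hEx]
      · -- leaf: emit
        have hphicons : pvPhi ms (x :: rest) = 1 + pvPhi ms rest := by
          simp [pvPhi, hx]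
        obtain ⟨n, hn, hrun⟩ := IH (pvPhi ms rest) (by omega) rest (acc ++ [x]) rfl hinvrest
        refine ⟨n + 1, by omega, ?_⟩
        rw [pvLoopB_cons_none n ms x rest acc (by rw [pvGet?_mk, if_neg hx]), hrun]
        simp [pvE, hx]

theorem pvPhi_le_fuel (ms : List (String × List String)) (x : String) :
    pvPhi ms (pvChl ms x) + 1 ≤ pvFuelB ms := by
  have hT := pvT_ge_two ms
  have hbound : ∀ c ∈ pvChl ms x,
      (if 0 < pvPos ms c then pvT ms ^ pvM ms c else 1) ≤ pvT ms ^ ms.length := by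
    intro c hc
    split
    · exact Nat.pow_le_pow_right (by omega) (pvM_le ms c)
    · exact Nat.one_le_pow _ _ (by omega)
  have hsum : pvPhi ms (pvChl ms x) ≤ (pvChl ms x).length * pvT ms ^ ms.length := by
    unfold pvPhi
    calc (List.map _ (pvChl ms x)).sum
        ≤ (List.map (fun _ => pvT ms ^ ms.length) (pvChl ms x)).sum := by
          apply List.sum_le_sum
          intro c hc
          exact hbound c hc
      _ = (pvChl ms x).length * pvT ms ^ ms.length := by
          rw [List.map_const']; simp [List.sum_replicate]
  have hlen := pvChl_len_le ms x
  have hfuel : pvFuelB ms = pvT ms * pvT ms ^ ms.length := by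
    simp [pvFuelB, pvT, pow_succ, Nat.mul_comm]
  have hone : 1 ≤ pvT ms ^ ms.length := Nat.one_le_pow _ _ (by omega)
  have hmain : pvPhi ms (pvChl ms x) ≤ (pvT ms - 2) * pvT ms ^ ms.length := by
    have := Nat.mul_le_mul_right (pvT ms ^ ms.length) hlen
    omega
  rw [hfuel]
  have hmul : (pvT ms - 2) * pvT ms ^ ms.length + 2 * pvT ms ^ ms.length
      = pvT ms * pvT ms ^ ms.length := by
    rw [← Nat.add_mul, Nat.sub_add_cancel hT]
  omega

-- ===== VERDICT (by name: the statement is the Claim_ definition above) =====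
theorem get_terminal_points_spec : Claim_equal_get_terminal_points := by
  intro ms cl _hdom hpre
  unfold Spec_get_terminal_points get_terminal_points get_terminal_points_alt
  by_cases hcl : 0 < pvPos ms cl
  case neg =>
    -- current_level is not a key: both sides are []
    have hchl : pvChl ms cl = [] := pvChl_of_pos_zero ms cl (by omega)
    have hfuel : ∃ m, pvFuelB ms = m + 1 := by
      refine ⟨pvFuelB ms - 1, ?_⟩
      have : 0 < pvFuelB ms := by simp only [pvFuelB]; positivity
      omega
    obtain ⟨m, hm⟩ := hfuel
    rw [pvGetD_mk, hchl, pvRecA, pvGetD_mk, hchl, hm]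
    simp [pvLoopB]
  have hacy := pvAcyclic ms cl hpre
  have hinv : ∀ x ∈ pvChl ms cl, 0 < pvPos ms x → pvReachP ms cl x := by
    intro x hx hkx
    exact Or.inr (Relation.TransGen.single ⟨hcl, hkx, hx⟩)
  obtain ⟨n, hn, hrun⟩ := pvLoopB_sound ms cl hacy
    (pvPhi ms (pvChl ms cl)) (pvChl ms cl) [] rfl hinv
  rw [pvGetD_mk, pvLoopB_mono ms n (pvFuelB ms) _ _ _
        (by have := pvPhi_le_fuel ms cl; omega) hrun]
  rw [pvRecA_eq ms cl hacy (pvM ms cl) cl (ms.length + 1) (Or.inl rfl) le_rfl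
      (by have := pvM_le ms cl; omega), List.flatMap_def]
  simp
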